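-- pv_equiv track=rewrite | github.com/jessie-shen/Learning | 变位词判断.py | anagramSolution
-- ===== SOURCE A (Python) =====
-- def anagramSolution(s1, s2):
--     alist = list(s2)  # 复制s2到列表    python的字符串是不可变类型
--     pos1 = 0  # s1的下标位置
--     stikkOK = True  # 是否变位词的标记
--     while pos1 <len(s1) and stikkOK:
--         pos2 = 0  # s2的下标位置
--         found = False  # 是否找得到的标记
--         while pos2 < len(alist) and not found:
--             if s1[pos1] == alist[pos2]:   # s1的抽出每个字符，该字符和s2的每个字符逐个对比
--                 found = True   # 是否能找得到的标记
--             else: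
--                 pos2 = pos2 +1
--         if found:
--             alist[pos2] = None  # 如果s1的字符在s2中能找到，那么这个s1字符变成None
--         else:
--             stikkOK =False
--         pos1 =pos1 + 1
--     return stikkOK
-- ===== SOURCE B (Python) =====
-- def anagramSolution(s1, s2):
--     for c in set(s1):
--         if s1.count(c) > s2.count(c):
--             return False
--     return True
-- ===== Notes on version B (the rewrite author's own statement) =====
-- stated objective: faster
-- what changed: A repeatedly scans and marks a mutable copy of s2 for each char of s1 (nested loops); B compares per-character occurrence counts over the distinct characters of s1, removing the mark-and-rescan machinery.
import Mathlib
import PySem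

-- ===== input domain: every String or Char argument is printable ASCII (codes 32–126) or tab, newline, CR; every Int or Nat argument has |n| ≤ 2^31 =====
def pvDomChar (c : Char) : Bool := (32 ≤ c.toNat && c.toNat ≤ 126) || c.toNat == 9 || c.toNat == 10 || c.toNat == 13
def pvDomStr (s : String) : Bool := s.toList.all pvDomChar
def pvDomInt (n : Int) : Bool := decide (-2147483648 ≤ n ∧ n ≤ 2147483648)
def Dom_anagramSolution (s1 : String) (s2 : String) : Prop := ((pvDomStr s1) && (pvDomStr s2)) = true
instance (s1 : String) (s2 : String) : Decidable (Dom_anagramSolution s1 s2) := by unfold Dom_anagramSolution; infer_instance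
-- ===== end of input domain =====

-- B replaces A's nested find-and-mark scan of a mutable copy of s2 by a per-distinct-character
-- count comparison (simpler, no mutation).

-- ===== PORT A =====
-- inner while loop of A: scan alist for the first cell equal to `some c`; if found,
-- set that cell to `none` (Python's `alist[pos2] = None`) and return the updated list,
-- else report failure (none).
def scanA (c : Char) : List (Option Char) → Option (List (Option Char))
  | [] => none
  | x :: xs => if x == some c then some (none :: xs)
               else (scanA c xs).map (fun ys => x :: ys)

-- outer while loop of A over the characters of s1, threading alist and stikkOK
def loopA : List Char → List (Option Char) → Bool
  | [], _ => true
  | c :: cs, al =>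
      match scanA c al with
      | some al' => loopA cs al'
      | none => false

def anagramSolution (s1 : String) (s2 : String) : Bool :=
  loopA s1.toList (s2.toList.map some)

-- ===== PORT B =====
-- Source B: for c in set(s1): if s1.count(c) > s2.count(c): return False; return True
-- (str.count with a single-character needle is exactly the character count; the result
-- of the all-check does not depend on the set's iteration order)
def anagramSolution_alt (s1 : String) (s2 : String) : Bool :=
  (PySem.Set.ofList s1.toList).all
    (fun c => !(decide (s2.toList.count c < s1.toList.count c)))

-- ===== PRECONDITION & SPEC =====
def Spec_anagramSolution (s1 : String) (s2 : String) (out : Bool) : Prop := out = anagramSolution_alt s1 s2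
instance (s1 : String) (s2 : String) (out : Bool) : Decidable (Spec_anagramSolution s1 s2 out) := by unfold Spec_anagramSolution; infer_instance

-- ===== CLAIM (what is proved, stated in full; the proofs are below) =====
def Claim_equal_anagramSolution : Prop := ∀ (s1 : String) (s2 : String), Dom_anagramSolution s1 s2 → Spec_anagramSolution s1 s2 (anagramSolution s1 s2)

-- ===== LEMMAS AND PROOFS =====

lemma scanA_none_iff (c : Char) (al : List (Option Char)) :
    scanA c al = none ↔ al.count (some c) = 0 := by
  induction al with
  | nil => simp [scanA]
  | cons x xs ih =>
    by_cases h : x = some c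
    · simp [scanA, h]
    · simp [scanA, h, Option.map_eq_none_iff, ih]

lemma scanA_some_count (c d : Char) (al al' : List (Option Char))
    (h : scanA c al = some al') :
    al.count (some d) = al'.count (some d) + (if d = c then 1 else 0) := by
  induction al generalizing al' with
  | nil => simp [scanA] at h
  | cons y ys ih =>
    by_cases hy : y = some c
    · simp [scanA, hy] at h
      subst h
      rcases eq_or_ne d c with rfl | hd
      · simp [hy]
      · have hd' : ¬ c = d := fun h' => hd h'.symm
        simp [hy, hd, hd']
    · simp [scanA, hy, Option.map_eq_some_iff] at h
      obtain ⟨zs, hzs, rfl⟩ := h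
      have := ih zs hzs
      by_cases hd : d = c <;> simp [List.count_cons, hd] at this ⊢ <;> omega

lemma loopA_iff (l : List Char) (al : List (Option Char)) :
    loopA l al = true ↔ ∀ c : Char, l.count c ≤ al.count (some c) := by
  induction l generalizing al with
  | nil => simp [loopA]
  | cons c cs ih =>
    cases h : scanA c al with
    | none =>
      have h0 := (scanA_none_iff c al).mp h
      simp only [loopA, h]
      constructor
      · intro hfalse; cases hfalse
      · intro hall
        have := hall c
        simp [h0] at this
    | some al' =>
      simp only [loopA, h, ih]
      constructor
      · intro hall d
        have hle := hall d
        have hcd := scanA_some_count c d al al' h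
        rcases eq_or_ne d c with rfl | hd
        · simp at hle hcd ⊢; omega
        · have hd' : ¬ c = d := fun h' => hd h'.symm
          simp [hd, hd'] at hle hcd ⊢; omega
      · intro hall d
        have hle := hall d
        have hcd := scanA_some_count c d al al' h
        rcases eq_or_ne d c with rfl | hd
        · simp at hle hcd ⊢; omega
        · have hd' : ¬ c = d := fun h' => hd h'.symm
          simp [hd, hd'] at hle hcd ⊢; omega

lemma count_map_some (l : List Char) (c : Char) :
    (l.map some).count (some c) = l.count c :=
  List.count_map_of_injective l some (Option.some_injective Char) c

lemma alt_iff (s1 s2 : String) :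
    anagramSolution_alt s1 s2 = true ↔
      ∀ c : Char, s1.toList.count c ≤ s2.toList.count c := by
  unfold anagramSolution_alt
  rw [List.all_eq_true]
  constructor
  · intro h c
    by_cases hm : c ∈ s1.toList
    · have := h c ((PySem.Set.mem_ofList s1.toList c).mpr hm)
      simp at this
      omega
    · simp [List.count_eq_zero_of_not_mem hm]
  · intro h c _
    have := h c
    simp
    omega

-- ===== VERDICT (by name: the statement is the Claim_ definition above) =====
theorem anagramSolution_spec : Claim_equal_anagramSolution := by
  intro s1 s2 _
  unfold Spec_anagramSolution anagramSolution
  have hA : loopA s1.toList (s2.toList.map some) = true ↔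
      ∀ c : Char, s1.toList.count c ≤ s2.toList.count c := by
    rw [loopA_iff]
    simp only [count_map_some]
  have hB := alt_iff s1 s2
  have : loopA s1.toList (s2.toList.map some) = true ↔ anagramSolution_alt s1 s2 = true :=
    hA.trans hB.symm
  cases hb : anagramSolution_alt s1 s2 <;> cases ha : loopA s1.toList (s2.toList.map some) <;>
    simp_all
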